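-- pv_equiv track=rewrite | github.com/Tbzz83/advent-of-code-2025 | src/day_8/day_8.py | build_adj_map
-- ===== SOURCE A (Python) =====
-- import math
--
-- def build_adj_map(coords: list[list[int]]):
--     adj_map: dict[int, list[tuple[int,int]]] = {}
--
--     # i is cur
--     for i in range(len(coords)):
--         # j is all others
--         for j in range(len(coords)):
--             if i == j:
--                 continue
--             if i not in adj_map:
--                 adj_map[i] = []
--             if j not in adj_map:
--                 adj_map[j] = []
--
--             dx = coords[i][0] - coords[j][0]
--             dy = coords[i][1] - coords[j][1]
--             dz = coords[i][2] - coords[j][2]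
--
--             dist = int(math.sqrt(dx*dx + dy*dy + dz*dz))
--
--             adj_map[i].append((j, dist))
--
--     return adj_map
-- ===== SOURCE B (Python) =====
-- import math
--
-- def build_adj_map(coords: list[list[int]]):
--     n = len(coords)
--     adj: dict[int, list[tuple[int, int]]] = {}
--     # One flat loop over the n*(n-1)/2 unordered pairs, decoded from the pair
--     # index t by inverting the triangular numbers: j is the unique index with
--     # j*(j-1)/2 <= t < j*(j+1)/2 and i = t - j*(j-1)/2 < j.  Each distance is
--     # computed once and written into both endpoint rows.
--     for t in range(n * (n - 1) // 2):
--         j = (1 + math.isqrt(1 + 8 * t)) // 2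
--         i = t - j * (j - 1) // 2
--         dx = coords[i][0] - coords[j][0]
--         dy = coords[i][1] - coords[j][1]
--         dz = coords[i][2] - coords[j][2]
--         d = int(math.sqrt(dx * dx + dy * dy + dz * dz))
--         adj.setdefault(i, []).append((j, d))
--         adj.setdefault(j, []).append((i, d))
--     return adj
-- ===== Notes on version B (the rewrite author's own statement) =====
-- stated objective: alternative
-- what changed: B replaces A's nested i/j index loops with a single flat loop over the n*(n-1)/2 unordered-pair indices, decoding each pair (i,j) from the flat index by inverting triangular numbers with math.isqrt, computing each distance once and writing it into both endpoint rows via setdefault.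
import Mathlib
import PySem

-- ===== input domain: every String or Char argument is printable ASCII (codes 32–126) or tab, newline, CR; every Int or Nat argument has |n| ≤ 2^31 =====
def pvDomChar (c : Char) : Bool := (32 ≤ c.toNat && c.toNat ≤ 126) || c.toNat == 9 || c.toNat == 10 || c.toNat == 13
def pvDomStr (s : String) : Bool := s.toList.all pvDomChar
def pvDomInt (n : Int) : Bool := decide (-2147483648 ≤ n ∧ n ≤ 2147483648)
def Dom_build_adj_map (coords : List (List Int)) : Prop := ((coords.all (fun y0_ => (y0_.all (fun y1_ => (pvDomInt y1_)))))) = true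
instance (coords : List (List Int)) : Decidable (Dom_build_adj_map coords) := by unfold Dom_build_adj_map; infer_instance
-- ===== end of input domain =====

-- B re-implements A's nested i/j index loops as ONE flat loop over the n*(n-1)/2 unordered-pair
-- indices, decoding each pair (i, j) from the flat index by inverting triangular numbers with
-- math.isqrt and computing each distance once (objective: alternative algorithm); equality of the
-- RETURN values is what is proved here (A mutates nothing).

-- ===== PORT A =====
-- int(math.sqrt(n)) for a nonnegative int n: CPython first rounds n to the nearest double
-- (round-half-even at 53 significant bits), takes the correctly rounded double square root,
-- and int() truncates.  pyRoundDouble/pysqrtNat model this chain exactly in integer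
-- arithmetic; exact for all n whose square root fits a double's significand scaling used
-- here (in particular for every n ≤ 3·(2^32)^2 reachable inside Dom_build_adj_map).
def pyRoundDouble (n : Nat) : Nat :=
  if n < 2 ^ 53 then n
  else
    let e := n.log2 + 1 - 53
    let m := n >>> e
    let r := n - (m <<< e)
    let m' := if 2 * r > 2 ^ e ∨ (2 * r = 2 ^ e ∧ m % 2 = 1) then m + 1 else m
    m' <<< e

def pysqrtNat (n : Nat) : Nat :=
  if n = 0 then 0
  else
    let v := pyRoundDouble n
    let s := Nat.sqrt v
    let k := 52 - Nat.log2 s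
    let N := v * 4 ^ k
    let M := Nat.sqrt N
    let M' := if 4 * N > (2 * M + 1) ^ 2 then M + 1 else M
    M' >>> k

-- the three dx/dy/dz lines plus dist = int(math.sqrt(dx*dx+dy*dy+dz*dz)), shared verbatim
-- by both Pythons (out-of-range indices never occur inside Pre_build_adj_map)
def pvDist (coords : List (List Int)) (i j : Int) : Int :=
  let dx := PySem.List.pyGetD (PySem.List.pyGetD coords i []) 0 0 -
            PySem.List.pyGetD (PySem.List.pyGetD coords j []) 0 0
  let dy := PySem.List.pyGetD (PySem.List.pyGetD coords i []) 1 0 -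
            PySem.List.pyGetD (PySem.List.pyGetD coords j []) 1 0
  let dz := PySem.List.pyGetD (PySem.List.pyGetD coords i []) 2 0 -
            PySem.List.pyGetD (PySem.List.pyGetD coords j []) 2 0
  ((pysqrtNat (dx * dx + dy * dy + dz * dz).toNat : Nat) : Int)

-- the body of A's inner loop over j (named so the lemmas can speak about it)
def bodyA (coords : List (List Int)) (i : Int)
    (adj : PySem.Dict Int (List (Int × Int))) (j : Int) : PySem.Dict Int (List (Int × Int)) :=
  if i = j then adj
  else
    let adj := if adj.contains i then adj else adj.insert i []
    let adj := if adj.contains j then adj else adj.insert j []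
    adj.modify i [] (fun l => l ++ [(j, pvDist coords i j)])

def build_adj_map (coords : List (List Int)) : List (Int × List (Int × Int)) :=
  let n : Int := (coords.length : Int)
  ((PySem.List.pyRange 0 n 1).foldl
    (fun adj i => (PySem.List.pyRange 0 n 1).foldl (bodyA coords i) adj)
    (PySem.Dict.empty : PySem.Dict Int (List (Int × Int)))).items

-- ===== PORT B =====
-- B's loop body at flat pair index t: 'math.isqrt' is ported as Nat.sqrt (exact integer sqrt;
-- the argument 1+8t is nonnegative for every t the range produces), '//' as PySem.Int.floordiv,
-- and 'adj.setdefault(k, []).append(x)' is exactly PySem.Dict.modify k [] (· ++ [x])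
def bodyB (coords : List (List Int)) (adj : PySem.Dict Int (List (Int × Int))) (t : Int) :
    PySem.Dict Int (List (Int × Int)) :=
  let j := PySem.Int.floordiv (1 + ((Nat.sqrt (1 + 8 * t).toNat : Nat) : Int)) 2
  let i := t - PySem.Int.floordiv (j * (j - 1)) 2
  let dx := PySem.List.pyGetD (PySem.List.pyGetD coords i []) 0 0 -
            PySem.List.pyGetD (PySem.List.pyGetD coords j []) 0 0
  let dy := PySem.List.pyGetD (PySem.List.pyGetD coords i []) 1 0 -
            PySem.List.pyGetD (PySem.List.pyGetD coords j []) 1 0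
  let dz := PySem.List.pyGetD (PySem.List.pyGetD coords i []) 2 0 -
            PySem.List.pyGetD (PySem.List.pyGetD coords j []) 2 0
  let d := ((pysqrtNat (dx * dx + dy * dy + dz * dz).toNat : Nat) : Int)
  (adj.modify i [] (fun l => l ++ [(j, d)])).modify j [] (fun l => l ++ [(i, d)])

def build_adj_map_alt (coords : List (List Int)) : List (Int × List (Int × Int)) :=
  let n : Int := (coords.length : Int)
  ((PySem.List.pyRange 0 (PySem.Int.floordiv (n * (n - 1)) 2) 1).foldl (bodyB coords)
    (PySem.Dict.empty : PySem.Dict Int (List (Int × Int)))).items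

-- ===== PRECONDITION & SPEC =====
-- Pre_ excludes exactly the inputs on which A raises IndexError: two or more points, some of
-- which has fewer than three coordinates.
def Pre_build_adj_map (coords : List (List Int)) : Prop :=
  coords.length ≤ 1 ∨ ∀ r ∈ coords, 3 ≤ r.length
instance (coords : List (List Int)) : Decidable (Pre_build_adj_map coords) := by
  unfold Pre_build_adj_map; infer_instance

def pvWitness_build_adj_map : List (List Int) := [[0, 0, 0], [1, 2, 2]]

def Spec_build_adj_map (coords : List (List Int)) (out : List (Int × List (Int × Int))) : Prop := out = build_adj_map_alt coords
instance (coords : List (List Int)) (out : List (Int × List (Int × Int))) : Decidable (Spec_build_adj_map coords out) := by unfold Spec_build_adj_map; infer_instance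

-- ===== CLAIM (what is proved, stated in full; the proofs are below) =====
def Claim_equal_build_adj_map : Prop := ∀ (coords : List (List Int)), Dom_build_adj_map coords → Pre_build_adj_map coords → Spec_build_adj_map coords (build_adj_map coords)

-- ===== LEMMAS AND PROOFS =====

-- the row the finished adjacency map holds at key k, and the whole finished map
def rowFullN (c : List (List Int)) (n : Nat) (k : Int) : List (Int × Int) :=
  ((PySem.List.pyRange 0 (n : Int) 1).filter (fun j => j != k)).map (fun j => (j, pvDist c k j))

def specList (c : List (List Int)) : List (Int × List (Int × Int)) :=
  if c.length ≤ 1 then []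
  else (PySem.List.pyRange 0 (c.length : Int) 1).map (fun k => (k, rowFullN c c.length k))


lemma pvDist_symm (c : List (List Int)) (i j : Int) : pvDist c i j = pvDist c j i := by
  simp only [pvDist]
  ring_nf

lemma filter_pyRange_ne (n k : Int) (h0 : 0 ≤ k) (hk : k < n) :
    (PySem.List.pyRange 0 n 1).filter (fun j => j != k) =
      PySem.List.pyRange 0 k 1 ++ PySem.List.pyRange (k + 1) n 1 := by
  rw [PySem.List.pyRange_one_append 0 (k + 1) n (by omega) (by omega),
      PySem.List.pyRange_one_succ_right h0, List.filter_append, List.filter_append]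
  have h1 : (PySem.List.pyRange 0 k 1).filter (fun j => j != k) = PySem.List.pyRange 0 k 1 := by
    apply List.filter_eq_self.mpr
    intro a ha
    rw [PySem.List.mem_pyRange_one] at ha
    simp only [bne_iff_ne, ne_eq]
    omega
  have h2 : ([k] : List Int).filter (fun j => j != k) = [] := by simp
  have h3 : (PySem.List.pyRange (k + 1) n 1).filter (fun j => j != k) =
      PySem.List.pyRange (k + 1) n 1 := by
    apply List.filter_eq_self.mpr
    intro a ha
    rw [PySem.List.mem_pyRange_one] at ha
    simp only [bne_iff_ne, ne_eq]
    omega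
  rw [h1, h2, h3, List.append_nil]

lemma innerA_keyed (c : List (List Int)) (i : Int) :
    ∀ (js : List Int) (d : PySem.Dict Int (List (Int × Int))),
      d.contains i = true → (∀ j ∈ js, d.contains j = true) →
      (List.foldl (bodyA c i) d js).keys = d.keys ∧
      ∀ x, (List.foldl (bodyA c i) d js).getD x [] =
        if x = i then
          d.getD i [] ++ (js.filter (fun j => j != i)).map (fun j => (j, pvDist c i j))
        else d.getD x [] := by
  intro js
  induction js with
  | nil => intro d _ _; simp
  | cons j js ih =>
    intro d hi hjs
    by_cases hij : i = j
    · have hb : bodyA c i d j = d := by simp [bodyA, hij]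
      have hfilter : ((j :: js).filter (fun j' => j' != i)) = js.filter (fun j' => j' != i) := by
        simp [hij]
      obtain ⟨hk, hg⟩ := ih d hi (fun a ha => hjs a (List.mem_cons_of_mem _ ha))
      refine ⟨?_, ?_⟩
      · simpa [hb] using hk
      · intro x
        rw [List.foldl_cons, hb, hg x, hfilter]
    · have hj : d.contains j = true := hjs j (List.mem_cons_self ..)
      have hb : bodyA c i d j = d.modify i [] (fun l => l ++ [(j, pvDist c i j)]) := by
        simp [bodyA, hij, hi, hj]
      set d' := d.modify i [] (fun l => l ++ [(j, pvDist c i j)]) with hd'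
      have hkeys' : d'.keys = d.keys := by
        rw [hd', PySem.Dict.keys_modify, PySem.Dict.keys_insert_of_contains _ _ hi]
      have hci' : d'.contains i = true := by
        rw [hd', PySem.Dict.contains_modify]; simp
      have hcj' : ∀ a ∈ js, d'.contains a = true := by
        intro a ha
        rw [hd', PySem.Dict.contains_modify, hjs a (List.mem_cons_of_mem _ ha), Bool.or_true]
      obtain ⟨hk, hg⟩ := ih d' hci' hcj'
      have hgd' : ∀ x, d'.getD x [] =
          if x = i then d.getD i [] ++ [(j, pvDist c i j)] else d.getD x [] := by
        intro x
        rw [hd', PySem.Dict.getD_modify]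
      refine ⟨?_, ?_⟩
      · rw [List.foldl_cons, hb, hk, hkeys']
      · intro x
        rw [List.foldl_cons, hb, hg x]
        by_cases hx : x = i
        · rw [if_pos hx, if_pos hx, hgd' i, if_pos rfl]
          have hfil : (j :: js).filter (fun j' => j' != i) = j :: js.filter (fun j' => j' != i) := by
            simp [Ne.symm hij]
          rw [hfil, List.map_cons, List.append_assoc, List.singleton_append]
        · rw [if_neg hx, if_neg hx, hgd' x, if_neg hx]

lemma innerA_first (c : List (List Int)) :
    ∀ q : Nat, 2 ≤ q →
      (List.foldl (bodyA c 0) PySem.Dict.empty (PySem.List.pyRange 0 (q : Int) 1)).keys =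
        PySem.List.pyRange 0 (q : Int) 1 ∧
      ∀ x, (List.foldl (bodyA c 0) PySem.Dict.empty (PySem.List.pyRange 0 (q : Int) 1)).getD x [] =
        if x = 0 then (PySem.List.pyRange 1 (q : Int) 1).map (fun j => (j, pvDist c 0 j))
        else [] := by
  intro q hq
  induction q, hq using Nat.le_induction with
  | base =>
    have hr : PySem.List.pyRange 0 ((2 : Nat) : Int) 1 = [0, 1] := by decide
    have hr1 : PySem.List.pyRange 1 ((2 : Nat) : Int) 1 = [1] := by decide
    rw [hr, hr1]
    have hb0 : bodyA c 0 PySem.Dict.empty 0 = PySem.Dict.empty := by simp [bodyA]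
    have hb1 : bodyA c 0 PySem.Dict.empty 1 =
        ((PySem.Dict.empty.insert 0 []).insert 1 []).modify 0 []
          (fun l => l ++ [(1, pvDist c 0 1)]) := by
      simp [bodyA, PySem.Dict.contains_empty, PySem.Dict.contains_insert]
    rw [List.foldl_cons, hb0, List.foldl_cons, hb1, List.foldl_nil]
    constructor
    · rw [PySem.Dict.keys_modify,
          PySem.Dict.keys_insert_of_contains _ _ (by simp [PySem.Dict.contains_insert]),
          PySem.Dict.keys_insert_of_not_contains _ _ (by simp [PySem.Dict.contains_insert]),
          PySem.Dict.keys_insert_of_not_contains _ _ (by simp), PySem.Dict.keys_empty]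
      rfl
    · intro x
      rw [PySem.Dict.getD_modify, PySem.Dict.getD_insert, PySem.Dict.getD_insert]
      by_cases hx : x = 0
      · simp [hx]
      · simp [hx, PySem.Dict.getD_insert]
  | succ q hq2 ih =>
    obtain ⟨ihk, ihg⟩ := ih
    have hcast : (((q + 1 : Nat)) : Int) = (q : Int) + 1 := by push_cast; ring
    rw [hcast, PySem.List.pyRange_one_succ_right (by omega : (0 : Int) ≤ (q : Int)),
        PySem.List.pyRange_one_succ_right (by omega : (1 : Int) ≤ (q : Int)),
        List.foldl_append, List.foldl_cons, List.foldl_nil]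
    set D := List.foldl (bodyA c 0) PySem.Dict.empty (PySem.List.pyRange 0 (q : Int) 1) with hD
    have h0q : (0 : Int) ≠ (q : Int) := by omega
    have hc0 : D.contains 0 = true := by
      rw [PySem.Dict.contains_iff_mem_keys, ihk, PySem.List.mem_pyRange_one]; omega
    have hcq : D.contains (q : Int) = false := by
      have hn : ¬ (D.contains (q : Int) = true) := by
        rw [PySem.Dict.contains_iff_mem_keys, ihk, PySem.List.mem_pyRange_one]; omega
      simpa using hn
    have hb : bodyA c 0 D (q : Int) =
        (D.insert (q : Int) []).modify 0 [] (fun l => l ++ [((q : Int), pvDist c 0 (q : Int))]) := by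
      simp [bodyA, h0q, hc0, hcq]
    rw [hb]
    constructor
    · rw [PySem.Dict.keys_modify,
          PySem.Dict.keys_insert_of_contains _ _ (by simp [PySem.Dict.contains_insert, hc0]),
          PySem.Dict.keys_insert_of_not_contains _ _ hcq, ihk]
    · intro x
      rw [PySem.Dict.getD_modify, PySem.Dict.getD_insert]
      by_cases hx : x = 0
      · rw [if_pos hx, if_pos hx, if_neg h0q, ihg 0, if_pos rfl, List.map_append]
        simp
      · rw [if_neg hx, if_neg hx, PySem.Dict.getD_insert]
        by_cases hxq : x = (q : Int)
        · rw [if_pos hxq]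
        · rw [if_neg hxq, ihg x, if_neg hx]

lemma rowFullN_zero (c : List (List Int)) (n : Nat) (hn : 1 ≤ n) :
    rowFullN c n 0 = (PySem.List.pyRange 1 (n : Int) 1).map (fun j => (j, pvDist c 0 j)) := by
  unfold rowFullN
  rw [filter_pyRange_ne (n : Int) 0 (by omega) (by omega), PySem.List.pyRange_one_eq_nil le_rfl,
      List.nil_append, zero_add]

lemma outerA (c : List (List Int)) (n : Nat) (hn : 2 ≤ n) :
    ∀ p : Nat, 1 ≤ p → p ≤ n →
      (List.foldl (fun adj i => List.foldl (bodyA c i) adj (PySem.List.pyRange 0 (n : Int) 1))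
          PySem.Dict.empty (PySem.List.pyRange 0 (p : Int) 1)).keys =
        PySem.List.pyRange 0 (n : Int) 1 ∧
      ∀ x, (List.foldl (fun adj i => List.foldl (bodyA c i) adj (PySem.List.pyRange 0 (n : Int) 1))
          PySem.Dict.empty (PySem.List.pyRange 0 (p : Int) 1)).getD x [] =
        if 0 ≤ x ∧ x < (p : Int) then rowFullN c n x else [] := by
  intro p hp
  induction p, hp using Nat.le_induction with
  | base =>
    intro _
    have hr : PySem.List.pyRange 0 ((1 : Nat) : Int) 1 = [0] := by decide
    rw [hr, List.foldl_cons, List.foldl_nil]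
    obtain ⟨hk, hg⟩ := innerA_first c n hn
    refine ⟨hk, ?_⟩
    intro x
    rw [hg x]
    by_cases hx : x = 0
    · rw [if_pos hx, if_pos (by omega), hx, rowFullN_zero c n (by omega)]
    · rw [if_neg hx, if_neg (by omega)]
  | succ p hp1 ih =>
    intro hpn
    obtain ⟨ihk, ihg⟩ := ih (by omega)
    have hcast : (((p + 1 : Nat)) : Int) = (p : Int) + 1 := by push_cast; ring
    rw [hcast, PySem.List.pyRange_one_succ_right (by omega : (0 : Int) ≤ (p : Int)),
        List.foldl_append, List.foldl_cons, List.foldl_nil]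
    set D := List.foldl (fun adj i => List.foldl (bodyA c i) adj (PySem.List.pyRange 0 (n : Int) 1))
        PySem.Dict.empty (PySem.List.pyRange 0 (p : Int) 1) with hD
    have hcp : D.contains (p : Int) = true := by
      rw [PySem.Dict.contains_iff_mem_keys, ihk, PySem.List.mem_pyRange_one]; omega
    have hcall : ∀ j ∈ PySem.List.pyRange 0 (n : Int) 1, D.contains j = true := by
      intro j hj
      rw [PySem.Dict.contains_iff_mem_keys, ihk]; exact hj
    obtain ⟨hk, hg⟩ := innerA_keyed c (p : Int) (PySem.List.pyRange 0 (n : Int) 1) D hcp hcall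
    refine ⟨by rw [hk, ihk], ?_⟩
    intro x
    rw [hg x]
    by_cases hx : x = (p : Int)
    · rw [if_pos hx, ihg (p : Int), if_neg (by omega), List.nil_append, if_pos (by omega), hx]
      unfold rowFullN
      rfl
    · rw [if_neg hx, ihg x]
      by_cases hlt : 0 ≤ x ∧ x < (p : Int)
      · rw [if_pos hlt, if_pos (by omega)]
      · rw [if_neg hlt, if_neg (by omega)]

lemma A_eq_spec (c : List (List Int)) : build_adj_map c = specList c := by
  unfold build_adj_map specList
  by_cases h1 : c.length ≤ 1
  · rw [if_pos h1]
    have h01 : c.length = 0 ∨ c.length = 1 := by omega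
    rcases h01 with h0 | h0 <;> rw [h0] <;> dsimp only
    · rw [show PySem.List.pyRange 0 (((0 : Nat)) : Int) 1 = [] from by decide, List.foldl_nil]
      rfl
    · rw [show PySem.List.pyRange 0 (((1 : Nat)) : Int) 1 = [0] from by decide]
      simp only [List.foldl_cons, List.foldl_nil]
      have hb : bodyA c 0 PySem.Dict.empty 0 = PySem.Dict.empty := by simp [bodyA]
      rw [hb]
      rfl
  · rw [if_neg h1]
    obtain ⟨hk, hg⟩ := outerA c c.length (by omega) c.length (by omega) le_rfl
    have hnd : ((List.foldl (fun adj i => List.foldl (bodyA c i) adj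
        (PySem.List.pyRange 0 (c.length : Int) 1)) PySem.Dict.empty
        (PySem.List.pyRange 0 (c.length : Int) 1))).keys.Nodup := by
      rw [hk]; exact PySem.List.nodup_pyRange_one _ _
    rw [PySem.Dict.items_eq_map_keys _ hnd [], hk]
    apply List.map_congr_left
    intro k hkmem
    rw [PySem.List.mem_pyRange_one] at hkmem
    rw [hg k, if_pos (by omega)]

-- ===== B-side lemmas: triangular decoding and the flat fold =====

-- the m-th triangular number, the number of pairs (i, j) with i < j < m
def triN (m : Nat) : Nat := m * (m - 1) / 2

lemma triN_succ (m : Nat) : triN (m + 1) = triN m + m := by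
  cases m with
  | zero => rfl
  | succ m' =>
    unfold triN
    obtain ⟨k, hk⟩ := Nat.even_mul_succ_self m'
    have h1 : (m' + 1) * (m' + 1 - 1) = k + k := by
      rw [Nat.add_sub_cancel, Nat.mul_comm]; exact hk
    have h2 : (m' + 1 + 1) * (m' + 1 + 1 - 1) = k + k + 2 * (m' + 1) := by
      rw [Nat.add_sub_cancel]
      have : (m' + 2) * (m' + 1) = m' * (m' + 1) + 2 * (m' + 1) := by ring
      rw [this, hk]
    omega

-- decoding the flat index triN m + i (0 ≤ i < m): the isqrt step recovers m
lemma sqrt_decode (m i : Nat) (h1 : 1 ≤ m) (hi : i < m) :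
    (1 + Nat.sqrt (1 + 8 * (triN m + i))) / 2 = m := by
  obtain ⟨m', rfl⟩ : ∃ m', m = m' + 1 := ⟨m - 1, by omega⟩
  have htri : triN (m' + 1) + triN (m' + 1) = (m' + 1) * m' := by
    unfold triN
    simp only [Nat.add_sub_cancel]
    obtain ⟨k, hk⟩ := Nat.even_mul_succ_self m'
    have hk' : (m' + 1) * m' = k + k := by rw [Nat.mul_comm]; exact hk
    omega
  have hlo : (2 * m' + 1) ≤ Nat.sqrt (1 + 8 * (triN (m' + 1) + i)) := by
    rw [Nat.le_sqrt]
    have hsq : (2 * m' + 1) * (2 * m' + 1) = 4 * ((m' + 1) * m') + 1 := by ring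
    omega
  have hhi : Nat.sqrt (1 + 8 * (triN (m' + 1) + i)) < 2 * (m' + 1) + 1 := by
    rw [Nat.sqrt_lt]
    have hsq : (2 * (m' + 1) + 1) * (2 * (m' + 1) + 1) = 4 * ((m' + 1) * m') + 8 * m' + 9 := by
      ring
    omega
  omega

-- what bodyB does at the index of the pair (i, m): append (m, d) to row i, (i, d) to row m
def pairStep (c : List (List Int)) (m : Int) (adj : PySem.Dict Int (List (Int × Int)))
    (i : Int) : PySem.Dict Int (List (Int × Int)) :=
  (adj.modify i [] (fun l => l ++ [(m, pvDist c i m)])).modify m []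
    (fun l => l ++ [(i, pvDist c i m)])

lemma bodyB_eq_pairStep (c : List (List Int)) (m i : Nat) (h1 : 1 ≤ m) (hi : i < m)
    (adj : PySem.Dict Int (List (Int × Int))) :
    bodyB c adj ((triN m + i : Nat) : Int) = pairStep c (m : Int) adj (i : Int) := by
  have hcastArg : (1 + 8 * ((triN m + i : Nat) : Int)) = ((1 + 8 * (triN m + i) : Nat) : Int) := by
    push_cast; ring
  have hj : PySem.Int.floordiv (1 + ((Nat.sqrt (1 + 8 * ((triN m + i : Nat) : Int)).toNat : Nat) : Int)) 2
      = (m : Int) := by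
    rw [hcastArg, Int.toNat_natCast]
    have : ((1 : Int) + (Nat.sqrt (1 + 8 * (triN m + i)) : Int))
        = (((1 + Nat.sqrt (1 + 8 * (triN m + i)) : Nat)) : Int) := by push_cast; ring
    rw [this]
    have h2 : ((2 : Int)) = ((2 : Nat) : Int) := by norm_num
    rw [h2, PySem.Int.floordiv_natCast, sqrt_decode m i h1 hi]
  have hT : PySem.Int.floordiv ((m : Int) * ((m : Int) - 1)) 2 = ((triN m : Nat) : Int) := by
    have hcast : (m : Int) * ((m : Int) - 1) = ((m * (m - 1) : Nat) : Int) := by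
      push_cast [Nat.cast_sub h1]; ring
    have h2 : ((2 : Int)) = ((2 : Nat) : Int) := by norm_num
    rw [hcast, h2, PySem.Int.floordiv_natCast]
    rfl
  have hi' : ((triN m + i : Nat) : Int) - ((triN m : Nat) : Int) = (i : Int) := by
    push_cast; ring
  simp only [bodyB, pairStep, pvDist, hj, hT, hi']

lemma pyRange_shift (a : Int) (k : Nat) :
    PySem.List.pyRange a (a + (k : Int)) 1 = (PySem.List.pyRange 0 (k : Int) 1).map (fun t => a + t) := by
  induction k with
  | zero =>
    rw [show a + ((0 : Nat) : Int) = a from by push_cast; ring,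
        PySem.List.pyRange_one_eq_nil le_rfl,
        show ((0 : Nat) : Int) = 0 from rfl, PySem.List.pyRange_one_eq_nil le_rfl]
    rfl
  | succ k ih =>
    have hc : ((k + 1 : Nat) : Int) = (k : Int) + 1 := by push_cast; ring
    rw [hc, show a + ((k : Int) + 1) = (a + (k : Int)) + 1 from by ring,
        PySem.List.pyRange_one_succ_right (by omega : a ≤ a + (k : Int)),
        PySem.List.pyRange_one_succ_right (by omega : (0 : Int) ≤ (k : Int)),
        List.map_append, ih]
    rfl

-- folding one whole block of the flat loop (all pairs (·, m)) = folding pairStep over range(m)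
lemma block_eq_pairSteps (c : List (List Int)) (m : Nat) (h1 : 1 ≤ m)
    (D : PySem.Dict Int (List (Int × Int))) :
    List.foldl (bodyB c) D
        (PySem.List.pyRange ((triN m : Nat) : Int) (((triN m : Nat) : Int) + (m : Int)) 1) =
      List.foldl (pairStep c (m : Int)) D (PySem.List.pyRange 0 (m : Int) 1) := by
  rw [pyRange_shift, List.foldl_map]
  apply PySem.List.foldl_congr_mem
  intro acc x hx
  rw [PySem.List.mem_pyRange_one] at hx
  have hx0 : x = ((x.toNat : Nat) : Int) := (Int.toNat_of_nonneg hx.1).symm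
  have hcast : ((triN m : Nat) : Int) + x = ((triN m + x.toNat : Nat) : Int) := by
    push_cast; omega
  rw [hcast, bodyB_eq_pairStep c m x.toNat h1 (by omega), ← hx0]

-- one growth step of the finished row: adding point m appends (m, d) to every earlier row
lemma rowFullN_succ (c : List (List Int)) (m : Nat) (x : Int) (_h0 : 0 ≤ x) (hx : x < (m : Int)) :
    rowFullN c (m + 1) x = rowFullN c m x ++ [((m : Int), pvDist c x (m : Int))] := by
  unfold rowFullN
  have hc : ((m + 1 : Nat) : Int) = (m : Int) + 1 := by push_cast; ring
  rw [hc, PySem.List.pyRange_one_succ_right (by omega : (0 : Int) ≤ (m : Int)),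
      List.filter_append, List.map_append]
  have hm : ([(m : Int)] : List Int).filter (fun j => j != x) = [(m : Int)] := by
    simp only [List.filter_cons, List.filter_nil]
    rw [if_pos (by simp only [bne_iff_ne, ne_eq]; omega)]
  rw [hm]
  rfl

-- and the new row m itself is the full row of the (m+1)-point map
lemma rowFullN_new (c : List (List Int)) (m : Nat) :
    rowFullN c (m + 1) ((m : Int)) =
      (PySem.List.pyRange 0 (m : Int) 1).map (fun i => (i, pvDist c i (m : Int))) := by
  unfold rowFullN
  have hc : ((m + 1 : Nat) : Int) = (m : Int) + 1 := by push_cast; ring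
  rw [hc, filter_pyRange_ne ((m : Int) + 1) (m : Int) (by omega) (by omega),
      PySem.List.pyRange_one_eq_nil (le_rfl : (m : Int) + 1 ≤ (m : Int) + 1), List.append_nil]
  apply List.map_congr_left
  intro a _
  rw [pvDist_symm]

-- the inner induction over one block: after the first p pairs (i, m), i < p
lemma blockFold (c : List (List Int)) (m : Nat) (h2 : 2 ≤ m)
    (D : PySem.Dict Int (List (Int × Int)))
    (hkeys : D.keys = PySem.List.pyRange 0 (m : Int) 1)
    (hget : ∀ x, D.getD x [] = if 0 ≤ x ∧ x < (m : Int) then rowFullN c m x else []) :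
    ∀ p : Nat, 1 ≤ p → p ≤ m →
      ((PySem.List.pyRange 0 (p : Int) 1).foldl (pairStep c (m : Int)) D).keys
          = PySem.List.pyRange 0 (m : Int) 1 ++ [(m : Int)] ∧
      ∀ x, ((PySem.List.pyRange 0 (p : Int) 1).foldl (pairStep c (m : Int)) D).getD x []
          = if 0 ≤ x ∧ x < (p : Int) then rowFullN c m x ++ [((m : Int), pvDist c x (m : Int))]
            else if 0 ≤ x ∧ x < (m : Int) then rowFullN c m x
            else if x = (m : Int) then
              (PySem.List.pyRange 0 (p : Int) 1).map (fun i => (i, pvDist c i (m : Int)))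
            else [] := by
  have hcont : ∀ y : Int, D.contains y = true ↔ (0 ≤ y ∧ y < (m : Int)) := by
    intro y
    rw [PySem.Dict.contains_iff_mem_keys, hkeys, PySem.List.mem_pyRange_one]
  intro p hp
  induction p, hp using Nat.le_induction with
  | base =>
    intro _
    have hr : PySem.List.pyRange 0 ((1 : Nat) : Int) 1 = [0] := by decide
    rw [hr, List.foldl_cons, List.foldl_nil]
    have hc0 : D.contains 0 = true := (hcont 0).mpr (by omega)
    have hcm : D.contains ((m : Int)) = false := by
      have : ¬ (D.contains ((m : Int)) = true) := by rw [hcont]; omega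
      simpa using this
    unfold pairStep
    constructor
    · rw [PySem.Dict.keys_modify, PySem.Dict.keys_insert_of_not_contains _ _
            (by rw [PySem.Dict.contains_modify, hcm]
                simp only [Bool.or_false]
                exact beq_eq_false_iff_ne.mpr (by omega)),
          PySem.Dict.keys_modify, PySem.Dict.keys_insert_of_contains _ _ hc0, hkeys]
    · intro x
      simp only [PySem.Dict.getD_modify]
      by_cases hxm : x = (m : Int)
      · rw [if_pos hxm, if_neg (show ¬ ((m : Int) = 0) by omega), hget ((m : Int)),
            if_neg (show ¬ ((0:Int) ≤ (m:Int) ∧ (m:Int) < (m:Int)) by omega), List.nil_append,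
            if_neg (show ¬ ((0:Int) ≤ x ∧ x < ((1:Nat):Int)) by omega),
            if_neg (show ¬ ((0:Int) ≤ x ∧ x < (m:Int)) by omega), if_pos hxm]
        rfl
      · rw [if_neg hxm]
        by_cases hx0 : x = 0
        · rw [if_pos hx0, hget 0, if_pos (show (0:Int) ≤ 0 ∧ (0:Int) < (m:Int) by omega),
              if_pos (show (0:Int) ≤ x ∧ x < ((1:Nat):Int) by omega), hx0]
        · rw [if_neg hx0, hget x, if_neg (show ¬ ((0:Int) ≤ x ∧ x < ((1:Nat):Int)) by omega)]
          by_cases hlt : (0:Int) ≤ x ∧ x < (m : Int)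
          · rw [if_pos hlt, if_pos hlt]
          · rw [if_neg hlt, if_neg hlt, if_neg hxm]
  | succ p hp1 ih =>
    intro hpm
    obtain ⟨ihk, ihg⟩ := ih (by omega)
    have hcast : (((p + 1 : Nat)) : Int) = (p : Int) + 1 := by push_cast; ring
    rw [hcast, PySem.List.pyRange_one_succ_right (by omega : (0 : Int) ≤ (p : Int)),
        List.foldl_append, List.foldl_cons, List.foldl_nil]
    set E := (PySem.List.pyRange 0 (p : Int) 1).foldl (pairStep c (m : Int)) D with hE
    have hcp : E.contains ((p : Int)) = true := by
      rw [PySem.Dict.contains_iff_mem_keys, ihk]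
      simp only [List.mem_append, PySem.List.mem_pyRange_one]
      left; omega
    have hcm : E.contains ((m : Int)) = true := by
      rw [PySem.Dict.contains_iff_mem_keys, ihk]
      simp
    unfold pairStep
    constructor
    · rw [PySem.Dict.keys_modify, PySem.Dict.keys_insert_of_contains _ _
            (by rw [PySem.Dict.contains_modify, hcm]; simp),
          PySem.Dict.keys_modify, PySem.Dict.keys_insert_of_contains _ _ hcp, ihk]
    · intro x
      simp only [PySem.Dict.getD_modify]
      by_cases hxm : x = (m : Int)
      · rw [if_pos hxm, if_neg (by omega : ¬ ((m : Int) = (p : Int))), ihg ((m : Int)),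
            if_neg (by omega), if_neg (by omega), if_pos rfl, if_neg (by omega),
            if_neg (by omega), if_pos hxm, List.map_append]
        rfl
      · rw [if_neg hxm]
        by_cases hxp : x = (p : Int)
        · rw [if_pos hxp, ihg ((p : Int)), if_neg (by omega), if_pos (by omega),
              if_pos (by omega), hxp]
        · rw [if_neg hxp, ihg x]
          by_cases hlt : (0:Int) ≤ x ∧ x < (p : Int)
          · rw [if_pos hlt, if_pos (show (0:Int) ≤ x ∧ x < (p:Int) + 1 by omega)]
          · rw [if_neg hlt]
            by_cases hltm : (0:Int) ≤ x ∧ x < (m : Int)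
            · rw [if_pos hltm, if_neg (show ¬ ((0:Int) ≤ x ∧ x < (p:Int) + 1) by omega),
                  if_pos hltm]
            · rw [if_neg hltm, if_neg hxm,
                  if_neg (show ¬ ((0:Int) ≤ x ∧ x < (p:Int) + 1) by omega), if_neg hltm,
                  if_neg hxm]
-- the outer induction over the number of points m
lemma flatFold (c : List (List Int)) :
    ∀ m : Nat, 2 ≤ m →
      (List.foldl (bodyB c) PySem.Dict.empty (PySem.List.pyRange 0 ((triN m : Nat) : Int) 1)).keys
          = PySem.List.pyRange 0 (m : Int) 1 ∧
      ∀ x, (List.foldl (bodyB c) PySem.Dict.empty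
              (PySem.List.pyRange 0 ((triN m : Nat) : Int) 1)).getD x []
          = if 0 ≤ x ∧ x < (m : Int) then rowFullN c m x else [] := by
  intro m hm
  induction m, hm using Nat.le_induction with
  | base =>
    have hr : PySem.List.pyRange 0 ((triN 2 : Nat) : Int) 1 = [((triN 1 + 0 : Nat) : Int)] := by
      decide
    rw [hr, List.foldl_cons, List.foldl_nil,
        bodyB_eq_pairStep c 1 0 le_rfl (by omega) PySem.Dict.empty]
    unfold pairStep
    simp only [Nat.cast_zero, Nat.cast_one, Nat.cast_ofNat]
    constructor
    · rw [PySem.Dict.keys_modify, PySem.Dict.keys_insert_of_not_contains _ _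
            (by rw [PySem.Dict.contains_modify, PySem.Dict.contains_empty]
                simp only [Bool.or_false]
                exact beq_eq_false_iff_ne.mpr (by omega)),
          PySem.Dict.keys_modify, PySem.Dict.keys_insert_of_not_contains _ _
            (PySem.Dict.contains_empty 0),
          PySem.Dict.keys_empty, List.nil_append]
      decide
    · intro x
      simp only [PySem.Dict.getD_modify, PySem.Dict.getD_empty, List.nil_append]
      have hrow0 : rowFullN c 2 0 = [(1, pvDist c 0 1)] := by
        unfold rowFullN
        rw [show ((2 : Nat) : Int) = 2 from by norm_num,
            show (PySem.List.pyRange 0 2 1).filter (fun j => j != 0) = [1] from by decide]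
        rfl
      have hrow1 : rowFullN c 2 1 = [(0, pvDist c 1 0)] := by
        unfold rowFullN
        rw [show ((2 : Nat) : Int) = 2 from by norm_num,
            show (PySem.List.pyRange 0 2 1).filter (fun j => j != 1) = [0] from by decide]
        rfl
      by_cases hx1 : x = 1
      · rw [if_pos hx1, if_neg (show ¬ ((1 : Int) = 0) by omega), List.nil_append,
            if_pos (show (0 : Int) ≤ x ∧ x < (2 : Int) by omega), hx1, hrow1,
            pvDist_symm c 1 0]
      · rw [if_neg hx1]
        by_cases hx0 : x = 0
        · rw [if_pos hx0, if_pos (show (0 : Int) ≤ x ∧ x < (2 : Int) by omega), hx0, hrow0]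
        · rw [if_neg hx0, if_neg (show ¬ ((0 : Int) ≤ x ∧ x < (2 : Int)) by omega)]
  | succ m hm2 ih =>
    obtain ⟨ihk, ihg⟩ := ih
    have htri : ((triN (m + 1) : Nat) : Int) = ((triN m : Nat) : Int) + (m : Int) := by
      rw [triN_succ]; push_cast; ring
    rw [htri, PySem.List.pyRange_one_append 0 ((triN m : Nat) : Int)
          (((triN m : Nat) : Int) + (m : Int)) (by positivity) (by omega),
        List.foldl_append, block_eq_pairSteps c m (by omega)]
    obtain ⟨hk, hg⟩ := blockFold c m hm2 _ ihk ihg m (by omega) le_rfl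
    have hcast : ((m + 1 : Nat) : Int) = (m : Int) + 1 := by push_cast; ring
    constructor
    · rw [hk, hcast, PySem.List.pyRange_one_succ_right (by omega : (0 : Int) ≤ (m : Int))]
    · intro x
      rw [hg x]
      by_cases hxm : x = (m : Int)
      · rw [if_neg (by omega), if_neg (by omega), if_pos hxm, if_pos (by omega), hxm,
            rowFullN_new]
      · by_cases hlt : 0 ≤ x ∧ x < (m : Int)
        · rw [if_pos hlt, if_pos (by omega), rowFullN_succ c m x hlt.1 hlt.2]
        · rw [if_neg hlt, if_neg hlt, if_neg hxm, if_neg (by omega)]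

lemma B_eq_spec (c : List (List Int)) : build_adj_map_alt c = specList c := by
  unfold build_adj_map_alt specList
  by_cases h1 : c.length ≤ 1
  · rw [if_pos h1]
    have h01 : c.length = 0 ∨ c.length = 1 := by omega
    rcases h01 with h0 | h0 <;> rw [h0] <;> rfl
  · rw [if_neg h1]
    show (List.foldl (bodyB c) PySem.Dict.empty
        (PySem.List.pyRange 0
          (PySem.Int.floordiv ((c.length : Int) * ((c.length : Int) - 1)) 2) 1)).items
      = (PySem.List.pyRange 0 (c.length : Int) 1).map (fun k => (k, rowFullN c c.length k))
    have hcast : PySem.Int.floordiv ((c.length : Int) * ((c.length : Int) - 1)) 2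
        = ((triN c.length : Nat) : Int) := by
      have h2 : (c.length : Int) * ((c.length : Int) - 1)
          = ((c.length * (c.length - 1) : Nat) : Int) := by
        push_cast [Nat.cast_sub (by omega : 1 ≤ c.length)]; ring
      rw [h2, show ((2 : Int)) = ((2 : Nat) : Int) from by norm_num, PySem.Int.floordiv_natCast]
      rfl
    rw [hcast]
    obtain ⟨hk, hg⟩ := flatFold c c.length (by omega)
    have hnd : (List.foldl (bodyB c) PySem.Dict.empty
        (PySem.List.pyRange 0 ((triN c.length : Nat) : Int) 1)).keys.Nodup := by
      rw [hk]; exact PySem.List.nodup_pyRange_one _ _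
    rw [PySem.Dict.items_eq_map_keys _ hnd [], hk]
    apply List.map_congr_left
    intro k hkmem
    rw [PySem.List.mem_pyRange_one] at hkmem
    rw [hg k, if_pos (by omega)]

-- ===== VERDICT (by name: the statement is the Claim_ definition above) =====
theorem build_adj_map_spec : Claim_equal_build_adj_map := by
  intro c _ _
  unfold Spec_build_adj_map
  rw [A_eq_spec, B_eq_spec]
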